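-- pv_equiv track=rewrite | github.com/happiness6533/cs-lecture-project | 5. 알고리즘/5-2. 실전편/3. 프로그래머스 레벨2, 3/3-1. 레벨2/29. H-Index.py | is_h_index_candidate
-- ===== SOURCE A (Python) =====
-- def is_h_index_candidate(citations, h):
--     h_cnt = 0
--     if h == 0:
--         return True
--
--     for i in range(len(citations)):
--         if citations[i] >= h:
--             h_cnt += 1
--             if h_cnt == h:
--                 return True
--
--     return False
-- ===== SOURCE B (Python) =====
-- def is_h_index_candidate(citations, h):
--     if h <= 0:
--         return h == 0
--     if h > len(citations):
--         return False
--     return sorted(citations, reverse=True)[h - 1] >= h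
-- ===== Notes on version B (the rewrite author's own statement) =====
-- stated objective: alternative
-- what changed: Replaced A's early-exit counting scan with a running counter by a guard on h plus a single descending sort and one index lookup: sorted(citations, reverse=True)[h-1] >= h.
import Mathlib
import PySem

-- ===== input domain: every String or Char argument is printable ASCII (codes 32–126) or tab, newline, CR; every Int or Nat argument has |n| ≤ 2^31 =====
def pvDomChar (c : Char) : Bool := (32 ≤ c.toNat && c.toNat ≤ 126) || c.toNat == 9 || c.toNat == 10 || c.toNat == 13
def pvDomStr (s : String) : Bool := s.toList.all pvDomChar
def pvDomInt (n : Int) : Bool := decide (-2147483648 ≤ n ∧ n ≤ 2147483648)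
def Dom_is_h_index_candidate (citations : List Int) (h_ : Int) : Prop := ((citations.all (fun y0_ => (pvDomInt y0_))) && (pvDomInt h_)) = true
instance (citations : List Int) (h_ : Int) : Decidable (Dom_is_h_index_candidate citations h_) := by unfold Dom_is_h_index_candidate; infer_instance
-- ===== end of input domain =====

-- B replaces A's early-exit counting scan with a sort-then-index check: sort descending, test citations_sorted[h-1] >= h (alternative decomposition, not faster).


-- ===== PORT A =====
-- the for-loop over citations with running counter h_cnt and early return
def goA (h_ : Int) : List Int → Int → Bool
  | [], _ => false
  | c :: rest, h_cnt =>
    if h_ ≤ c then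
      if h_cnt + 1 == h_ then true else goA h_ rest (h_cnt + 1)
    else goA h_ rest h_cnt

def is_h_index_candidate (citations : List Int) (h_ : Int) : Bool :=
  if h_ == 0 then true
  else goA h_ citations 0

-- ===== PORT B =====
def is_h_index_candidate_alt (citations : List Int) (h_ : Int) : Bool :=
  if h_ ≤ 0 then h_ == 0
  else if (citations.length : Int) < h_ then false
  else
    -- index h_-1 is always in range here, so the total pyGetD form is exact
    h_ ≤ PySem.List.pyGetD (PySem.List.sorted citations (fun x => x) true) (h_ - 1) 0

-- ===== PRECONDITION & SPEC =====
def Spec_is_h_index_candidate (citations : List Int) (h_ : Int) (out : Bool) : Prop := out = is_h_index_candidate_alt citations h_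
instance (citations : List Int) (h_ : Int) (out : Bool) : Decidable (Spec_is_h_index_candidate citations h_ out) := by unfold Spec_is_h_index_candidate; infer_instance

-- ===== CLAIM (what is proved, stated in full; the proofs are below) =====
def Claim_equal_is_h_index_candidate : Prop := ∀ (citations : List Int) (h_ : Int), Dom_is_h_index_candidate citations h_ → Spec_is_h_index_candidate citations h_ (is_h_index_candidate citations h_)

-- ===== LEMMAS AND PROOFS =====

-- A's loop returns true iff the counter would reach h_: cnt + (number of elements ≥ h_) ≥ h_
theorem goA_eq_count (h_ : Int) (xs : List Int) :
    ∀ cnt : Int, cnt < h_ →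
      goA h_ xs cnt = decide (h_ ≤ cnt + (xs.countP (fun c => decide (h_ ≤ c)) : Int)) := by
  induction xs with
  | nil => intro cnt hc; simp [goA]; omega
  | cons c rest ih =>
    intro cnt hc
    by_cases hcge : h_ ≤ c
    · simp only [goA, List.countP_cons, hcge, decide_true]
      by_cases hhit : cnt + 1 = h_
      · have : (cnt + 1 == h_) = true := by simpa using hhit
        rw [this]
        simp only [if_true]
        symm; rw [decide_eq_true_iff]
        push_cast
        omega
      · have : (cnt + 1 == h_) = false := by simpa using hhit
        rw [this]
        simp only [Bool.false_eq_true, if_false, if_true]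
        rw [ih (cnt + 1) (by omega)]
        rw [decide_eq_decide]
        push_cast
        omega
    · simp only [goA, List.countP_cons, hcge, decide_false]
      rw [ih cnt hc]
      simp

-- for negative h_ the counter starts at 0 and only grows, so it never equals h_
theorem goA_neg (h_ : Int) (hneg : h_ < 0) (xs : List Int) :
    ∀ cnt : Int, 0 ≤ cnt → goA h_ xs cnt = false := by
  induction xs with
  | nil => intro cnt _; simp [goA]
  | cons c rest ih =>
    intro cnt hc
    by_cases hcge : h_ ≤ c
    · simp only [goA, if_pos hcge]
      have : (cnt + 1 == h_) = false := by simpa using (by omega : ¬ cnt + 1 = h_)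
      rw [this]
      simp only [Bool.false_eq_true, if_false]
      exact ih (cnt + 1) (by omega)
    · simp only [goA, if_neg hcge]
      exact ih cnt hc

-- descending sorted list: if the element at index k is ≥ h_, so are all earlier ones; if it is < h_, so are all later ones
theorem count_ge_iff_sorted_at (citations : List Int) (h_ : Int)
    (h1 : 1 ≤ h_) (h2 : h_ ≤ (citations.length : Int)) :
    (h_ ≤ (citations.countP (fun c => decide (h_ ≤ c)) : Int)) ↔
      h_ ≤ (PySem.List.sorted citations (fun x => x) true).getD (h_ - 1).toNat 0 := by
  set p : Int → Bool := fun c => decide (h_ ≤ c) with hp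
  set s := PySem.List.sorted citations (fun x => x) true with hs
  have hperm : s.Perm citations := PySem.List.sorted_perm citations (fun x => x) true
  have hlen : s.length = citations.length := hperm.length_eq
  have hcount : s.countP p = citations.countP p := hperm.countP_eq p
  have hpair : s.Pairwise (fun a b => b ≤ a) := PySem.List.sorted_pairwise_rev citations (fun x => x)
  have hmono : ∀ i j (hi : i < s.length) (hj : j < s.length), i < j → s[j] ≤ s[i] :=
    (List.pairwise_iff_getElem).1 hpair
  set k := (h_ - 1).toNat with hk
  have hk1 : (k : Int) = h_ - 1 := by omega
  have hklen : k < s.length := by omega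
  have hgetD : s.getD k 0 = s[k] := List.getD_eq_getElem s 0 hklen
  rw [hgetD]
  constructor
  · intro hcnt
    by_contra hlt
    push Not at hlt
    -- all elements from index k on are < h_, so count ≤ k < h_
    rw [← hcount] at hcnt
    have hsplit : s.countP p = (s.take k).countP p + (s.drop k).countP p := by
      conv_lhs => rw [← List.take_append_drop k s]
      rw [List.countP_append]
    have hdrop : (s.drop k).countP p = 0 := by
      rw [List.countP_eq_zero]
      intro a ha
      obtain ⟨j, hj, rfl⟩ := List.mem_iff_getElem.1 ha
      have hjlen : k + j < s.length := by
        have hd := hj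
        rw [List.length_drop] at hd
        omega
      rw [List.getElem_drop]
      have : s[k + j] ≤ s[k] := by
        rcases Nat.eq_zero_or_pos j with hj0 | hj0
        · subst hj0; simp
        · exact hmono k (k + j) hklen hjlen (by omega)
      simp [p]; omega
    have htake : (s.take k).countP p ≤ k := by
      calc (s.take k).countP p ≤ (s.take k).length := List.countP_le_length
        _ ≤ k := by simp
    omega
  · intro hge
    -- the first k+1 elements are all ≥ h_
    rw [← hcount]
    have hsplit : s.countP p = (s.take (k+1)).countP p + (s.drop (k+1)).countP p := by
      conv_lhs => rw [← List.take_append_drop (k+1) s]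
      rw [List.countP_append]
    have htake : (s.take (k+1)).countP p = k + 1 := by
      rw [List.countP_eq_length.2]
      · simp; omega
      · intro a ha
        obtain ⟨j, hj, rfl⟩ := List.mem_iff_getElem.1 ha
        have hjk : j < k + 1 := by
          have := hj; simp [List.length_take] at this; omega
        have hjlen : j < s.length := by omega
        rw [List.getElem_take]
        have : s[k] ≤ s[j] := by
          rcases Nat.lt_or_ge j k with hjk' | hjk'
          · exact hmono j k hjlen hklen hjk'
          · have : j = k := by omega
            subst this; simp
        simp [p]; omega
    have : 0 ≤ (s.drop (k+1)).countP p := Nat.zero_le _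
    omega

-- ===== VERDICT (by name: the statement is the Claim_ definition above) =====
theorem is_h_index_candidate_spec : Claim_equal_is_h_index_candidate := by
  intro citations h_ _
  unfold Spec_is_h_index_candidate is_h_index_candidate is_h_index_candidate_alt
  by_cases h0 : h_ = 0
  · subst h0; simp
  · rw [if_neg (by simpa using h0)]
    by_cases hneg : h_ ≤ 0
    · -- h_ < 0: the counter only grows from 0 and never equals the negative h_
      rw [if_pos hneg]
      have : (h_ == 0) = false := by simpa using h0
      rw [this]
      exact goA_neg h_ (by omega) citations 0 (by omega)
    · push Not at hneg
      rw [if_neg (by omega)]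
      rw [goA_eq_count h_ citations 0 (by omega)]
      by_cases hlen : (citations.length : Int) < h_
      · rw [if_pos hlen]
        simp
        have : citations.countP (fun c => decide (h_ ≤ c)) ≤ citations.length :=
          List.countP_le_length
        omega
      · push Not at hlen
        rw [if_neg (by omega)]
        have hrange : PySem.List.pyGetD (PySem.List.sorted citations (fun x => x) true) (h_ - 1) 0
            = (PySem.List.sorted citations (fun x => x) true).getD (h_ - 1).toNat 0 := by
          rw [PySem.List.pyGetD_of_nonneg _ _ (by omega)]
        rw [hrange]
        have := count_ge_iff_sorted_at citations h_ (by omega) hlen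
        simp only [zero_add]
        rw [decide_eq_decide]
        exact this
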